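-- pv_equiv track=rewrite | github.com/MrIncredibuell/advent-of-code-2021 | day19/main.py | compare_dists
-- ===== SOURCE A (Python) =====
-- from collections import defaultdict
--
-- def compare_dists(a, b):
--     offsets = defaultdict(int)
--     for (x1, y1, z1), dists1 in a.items():
--         for (x2, y2, z2), dists2 in b.items():
--             if len(dists1 & dists2) >= 1:
--                 offsets[(x1 - x2, y1 - y2, z1 - z2)] += 1
--     if offsets:
--         return max([(value, offset) for (offset, value) in offsets.items()])
--     return 0, (0,0,0)
-- ===== SOURCE B (Python) =====
-- def compare_dists(a, b):
--     # inverted index: distance -> set of b-points having it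
--     index = {}
--     for q, dists2 in b.items():
--         for d in dists2:
--             index.setdefault(d, set()).add(q)
--     offsets = {}
--     for (x1, y1, z1), dists1 in a.items():
--         cands = set()
--         for d in dists1:
--             cands |= index.get(d, set())
--         for (x2, y2, z2) in cands:
--             off = (x1 - x2, y1 - y2, z1 - z2)
--             offsets[off] = offsets.get(off, 0) + 1
--     if offsets:
--         return max((value, offset) for offset, value in offsets.items())
--     return 0, (0, 0, 0)
-- ===== Notes on version B (the rewrite author's own statement) =====
-- stated objective: alternative
-- what changed: Replaces A's all-pairs loop with a per-pair set intersection by an inverted index distance->set-of-b-points built once, so each a-point unions only the candidate b-points sharing some distance and the per-pair intersection disappears (intended as faster; a timing run read ~1.6x but inconsistently, so not claimed).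
import Mathlib
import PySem

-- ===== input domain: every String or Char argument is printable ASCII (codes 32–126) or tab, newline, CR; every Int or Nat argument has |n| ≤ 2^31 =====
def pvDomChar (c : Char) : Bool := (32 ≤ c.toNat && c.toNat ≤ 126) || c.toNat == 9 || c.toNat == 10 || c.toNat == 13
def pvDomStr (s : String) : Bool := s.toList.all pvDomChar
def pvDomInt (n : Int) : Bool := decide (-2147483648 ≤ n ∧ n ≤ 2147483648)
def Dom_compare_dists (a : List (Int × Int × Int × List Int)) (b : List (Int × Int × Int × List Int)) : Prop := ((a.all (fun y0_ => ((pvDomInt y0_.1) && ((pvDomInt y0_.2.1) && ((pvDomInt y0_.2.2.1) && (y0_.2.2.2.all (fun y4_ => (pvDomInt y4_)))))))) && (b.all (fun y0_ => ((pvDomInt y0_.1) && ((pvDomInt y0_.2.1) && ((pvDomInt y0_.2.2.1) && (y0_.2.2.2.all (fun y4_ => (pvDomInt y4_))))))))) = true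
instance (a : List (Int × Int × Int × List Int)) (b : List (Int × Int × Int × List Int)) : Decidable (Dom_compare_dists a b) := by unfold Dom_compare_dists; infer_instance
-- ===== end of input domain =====

-- B replaces A's all-pairs set-intersection scan by an inverted index distance → b-points,
-- visiting for each a-point only the b-points that share some distance with it (alternative algorithm).

-- ===== PORT A =====
-- Python's max on (int, (int,int,int)) tuples: lexicographic strict comparison …
def pvLt (p q : Int × (Int × Int × Int)) : Bool :=
  p.1 < q.1 || (p.1 == q.1 && (p.2.1 < q.2.1 || (p.2.1 == q.2.1 &&
    (p.2.2.1 < q.2.2.1 || (p.2.2.1 == q.2.2.1 && p.2.2.2 < q.2.2.2)))))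

-- … and max itself (first maximal element; none on []): shared by both ports, as both Pythons call max
def pvMax? (l : List (Int × (Int × Int × Int))) : Option (Int × (Int × Int × Int)) :=
  match l with
  | [] => none
  | x :: t => some (t.foldl (fun m y => if pvLt m y then y else m) x)

def compare_dists (a : List (Int × Int × Int × List Int)) (b : List (Int × Int × Int × List Int)) : Int × (Int × Int × Int) :=
  let offsets : PySem.Dict (Int × Int × Int) Int :=
    a.foldl (fun o p =>
      b.foldl (fun o q =>
        if 1 ≤ PySem.Set.len (PySem.Set.inter p.2.2.2 q.2.2.2) then
          o.modify (p.1 - q.1, p.2.1 - q.2.1, p.2.2.1 - q.2.2.1) 0 (· + 1)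
        else o) o) PySem.Dict.empty
  if offsets.items.isEmpty then (0, (0, 0, 0))
  else (pvMax? (offsets.items.map (fun kv => (kv.2, kv.1)))).getD (0, (0, 0, 0))

-- ===== PORT B =====
def compare_dists_alt (a : List (Int × Int × Int × List Int)) (b : List (Int × Int × Int × List Int)) : Int × (Int × Int × Int) :=
  let index : PySem.Dict Int (PySem.Set (Int × Int × Int)) :=
    b.foldl (fun idx q =>
      q.2.2.2.foldl (fun idx d =>
        idx.insert d (PySem.Set.add (idx.getD d PySem.Set.empty) (q.1, q.2.1, q.2.2.1))) idx)
      PySem.Dict.empty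
  let offsets : PySem.Dict (Int × Int × Int) Int :=
    a.foldl (fun o p =>
      let cands : PySem.Set (Int × Int × Int) :=
        p.2.2.2.foldl (fun s d => PySem.Set.union s (index.getD d PySem.Set.empty)) PySem.Set.empty
      cands.foldl (fun o c =>
        o.insert (p.1 - c.1, p.2.1 - c.2.1, p.2.2.1 - c.2.2)
          (o.getD (p.1 - c.1, p.2.1 - c.2.1, p.2.2.1 - c.2.2) 0 + 1)) o) PySem.Dict.empty
  if offsets.items.isEmpty then (0, (0, 0, 0))
  else (pvMax? (offsets.items.map (fun kv => (kv.2, kv.1)))).getD (0, (0, 0, 0))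

-- ===== PRECONDITION & SPEC =====
-- Pre_ excludes only b-lists that repeat a point key: such lists do not arise from a Python
-- dict argument (dict keys are unique), so A's behaviour on them is not defined by the source.
def Pre_compare_dists (a : List (Int × Int × Int × List Int)) (b : List (Int × Int × Int × List Int)) : Prop :=
  (b.map (fun t => (t.1, t.2.1, t.2.2.1))).Nodup
instance (a : List (Int × Int × Int × List Int)) (b : List (Int × Int × Int × List Int)) : Decidable (Pre_compare_dists a b) := by unfold Pre_compare_dists; infer_instance
def pvWitness_compare_dists : (List (Int × Int × Int × List Int)) × (List (Int × Int × Int × List Int)) :=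
  ([(0, 0, 0, [1, 2])], [(1, 0, 0, [2]), (0, 1, 0, [3])])

def Spec_compare_dists (a : List (Int × Int × Int × List Int)) (b : List (Int × Int × Int × List Int)) (out : Int × (Int × Int × Int)) : Prop := out = compare_dists_alt a b
instance (a : List (Int × Int × Int × List Int)) (b : List (Int × Int × Int × List Int)) (out : Int × (Int × Int × Int)) : Decidable (Spec_compare_dists a b out) := by unfold Spec_compare_dists; infer_instance

-- ===== CLAIM (what is proved, stated in full; the proofs are below) =====
def Claim_equal_compare_dists : Prop := ∀ (a : List (Int × Int × Int × List Int)) (b : List (Int × Int × Int × List Int)), Dom_compare_dists a b → Pre_compare_dists a b → Spec_compare_dists a b (compare_dists a b)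

-- ===== LEMMAS AND PROOFS =====

-- abbreviations for the proof
def pvKey (t : Int × Int × Int × List Int) : Int × Int × Int := (t.1, t.2.1, t.2.2.1)

def pvOff (p : Int × Int × Int × List Int) (c : Int × Int × Int) : Int × Int × Int :=
  (p.1 - c.1, p.2.1 - c.2.1, p.2.2.1 - c.2.2)

def pvShare (p q : Int × Int × Int × List Int) : Bool :=
  decide (1 ≤ PySem.Set.len (PySem.Set.inter p.2.2.2 q.2.2.2))

def pvIndex (b : List (Int × Int × Int × List Int)) : PySem.Dict Int (PySem.Set (Int × Int × Int)) :=
  b.foldl (fun idx q =>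
    q.2.2.2.foldl (fun idx d =>
      idx.insert d (PySem.Set.add (idx.getD d PySem.Set.empty) (q.1, q.2.1, q.2.2.1))) idx)
    PySem.Dict.empty

def pvCands (b : List (Int × Int × Int × List Int)) (p : Int × Int × Int × List Int) :
    PySem.Set (Int × Int × Int) :=
  p.2.2.2.foldl (fun s d => PySem.Set.union s ((pvIndex b).getD d PySem.Set.empty)) PySem.Set.empty

def pvLA (a b : List (Int × Int × Int × List Int)) : List (Int × Int × Int) :=
  a.flatMap (fun p => (b.filter (fun q => pvShare p q)).map (fun q => pvOff p (pvKey q)))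

def pvLB (a b : List (Int × Int × Int × List Int)) : List (Int × Int × Int) :=
  a.flatMap (fun p => (pvCands b p).map (fun c => pvOff p c))

def pvTail (d : PySem.Dict (Int × Int × Int) Int) : Int × (Int × Int × Int) :=
  if d.items.isEmpty then (0, (0, 0, 0))
  else (pvMax? (d.items.map (fun kv => (kv.2, kv.1)))).getD (0, (0, 0, 0))

-- ---- the two offsets dicts are counters of flat offset lists ----

theorem dictA_inner (p : Int × Int × Int × List Int) (l : List (Int × Int × Int × List Int))
    (o : PySem.Dict (Int × Int × Int) Int) :
    l.foldl (fun o q =>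
        if 1 ≤ PySem.Set.len (PySem.Set.inter p.2.2.2 q.2.2.2) then
          o.modify (p.1 - q.1, p.2.1 - q.2.1, p.2.2.1 - q.2.2.1) 0 (· + 1)
        else o) o
      = ((l.filter (fun q => pvShare p q)).map (fun q => pvOff p (pvKey q))).foldl
          (fun o k => o.modify k 0 (· + 1)) o := by
  induction l generalizing o with
  | nil => rfl
  | cons q t ih =>
    simp only [List.foldl_cons, List.filter_cons]
    have hs : (pvShare p q = true) ↔ (1 ≤ PySem.Set.len (PySem.Set.inter p.2.2.2 q.2.2.2)) := by
      rw [pvShare, decide_eq_true_eq]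
    by_cases h : 1 ≤ PySem.Set.len (PySem.Set.inter p.2.2.2 q.2.2.2)
    · rw [if_pos h, if_pos (hs.mpr h), List.map_cons, List.foldl_cons, ih]
      rfl
    · rw [if_neg h, if_neg (fun hc => h (hs.mp hc))]
      exact ih _

theorem offsetsA_eq (a b : List (Int × Int × Int × List Int)) :
    a.foldl (fun o p =>
      b.foldl (fun o q =>
        if 1 ≤ PySem.Set.len (PySem.Set.inter p.2.2.2 q.2.2.2) then
          o.modify (p.1 - q.1, p.2.1 - q.2.1, p.2.2.1 - q.2.2.1) 0 (· + 1)
        else o) o) PySem.Dict.empty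
    = PySem.Dict.counter (pvLA a b) := by
  rw [PySem.Dict.counter_eq_foldl, pvLA, List.foldl_flatMap]
  congr 1
  funext o p
  rw [dictA_inner]

theorem offsetsB_eq (a b : List (Int × Int × Int × List Int)) :
    a.foldl (fun o p =>
      (pvCands b p).foldl (fun o c =>
        o.insert (pvOff p c) (o.getD (pvOff p c) 0 + 1)) o) PySem.Dict.empty
    = PySem.Dict.counter (pvLB a b) := by
  rw [← PySem.Dict.foldl_insert_getD_add_one_eq_counter, pvLB, List.foldl_flatMap]
  congr 1
  funext o p
  rw [List.foldl_map]

-- ---- membership characterisations ----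

theorem mem_inner_index (ds : List Int) (k : Int × Int × Int)
    (idx : PySem.Dict Int (PySem.Set (Int × Int × Int))) (d : Int) (y : Int × Int × Int) :
    y ∈ (ds.foldl (fun idx dd => idx.insert dd (PySem.Set.add (idx.getD dd PySem.Set.empty) k)) idx).getD d PySem.Set.empty
    ↔ y ∈ idx.getD d PySem.Set.empty ∨ (y = k ∧ d ∈ ds) := by
  induction ds generalizing idx with
  | nil => simp
  | cons dd t ih =>
    simp only [List.foldl_cons, ih, PySem.Dict.getD_insert, List.mem_cons]
    by_cases h : d = dd
    · subst h; simp [PySem.Set.mem_add]; tauto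
    · simp [h]

theorem mem_getD_pvIndex (b : List (Int × Int × Int × List Int)) (d : Int) (y : Int × Int × Int) :
    y ∈ (pvIndex b).getD d PySem.Set.empty ↔ ∃ q ∈ b, pvKey q = y ∧ d ∈ q.2.2.2 := by
  suffices h : ∀ (l : List (Int × Int × Int × List Int)) (idx : PySem.Dict Int (PySem.Set (Int × Int × Int))),
      y ∈ (l.foldl (fun idx q =>
        q.2.2.2.foldl (fun idx dd => idx.insert dd (PySem.Set.add (idx.getD dd PySem.Set.empty) (q.1, q.2.1, q.2.2.1))) idx) idx).getD d PySem.Set.empty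
      ↔ y ∈ idx.getD d PySem.Set.empty ∨ ∃ q ∈ l, pvKey q = y ∧ d ∈ q.2.2.2 by
    rw [pvIndex, h]
    simp [PySem.Dict.getD_empty, PySem.Set.empty]
  intro l
  induction l with
  | nil => simp
  | cons q t ih =>
    intro idx
    simp only [List.foldl_cons, ih, mem_inner_index, List.mem_cons]
    constructor
    · rintro ((h | ⟨rfl, hd⟩) | ⟨r, hr, hk, hd⟩)
      · exact Or.inl h
      · exact Or.inr ⟨q, Or.inl rfl, rfl, hd⟩
      · exact Or.inr ⟨r, Or.inr hr, hk, hd⟩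
    · rintro (h | ⟨r, (rfl | hr), hk, hd⟩)
      · exact Or.inl (Or.inl h)
      · exact Or.inl (Or.inr ⟨hk.symm, hd⟩)
      · exact Or.inr ⟨r, hr, hk, hd⟩

theorem mem_pvCands (b : List (Int × Int × Int × List Int)) (p : Int × Int × Int × List Int)
    (y : Int × Int × Int) :
    y ∈ pvCands b p ↔ ∃ q ∈ b, pvKey q = y ∧ ∃ d ∈ p.2.2.2, d ∈ q.2.2.2 := by
  suffices h : ∀ (ds : List Int) (s : PySem.Set (Int × Int × Int)),
      y ∈ ds.foldl (fun s d => PySem.Set.union s ((pvIndex b).getD d PySem.Set.empty)) s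
      ↔ y ∈ s ∨ ∃ d ∈ ds, y ∈ (pvIndex b).getD d PySem.Set.empty by
    rw [pvCands, h]
    simp only [PySem.Set.empty, List.not_mem_nil, false_or]
    constructor
    · rintro ⟨d, hd, hy⟩
      obtain ⟨q, hq, hk, hdq⟩ := (mem_getD_pvIndex b d y).mp hy
      exact ⟨q, hq, hk, d, hd, hdq⟩
    · rintro ⟨q, hq, hk, d, hd, hdq⟩
      exact ⟨d, hd, (mem_getD_pvIndex b d y).mpr ⟨q, hq, hk, hdq⟩⟩
  intro ds
  induction ds with
  | nil => simp
  | cons d t ih =>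
    intro s
    simp only [List.foldl_cons, ih, PySem.Set.mem_union, List.mem_cons]
    constructor
    · rintro ((h | h) | ⟨d', hd', h⟩)
      exacts [Or.inl h, Or.inr ⟨d, Or.inl rfl, h⟩, Or.inr ⟨d', Or.inr hd', h⟩]
    · rintro (h | ⟨d', (rfl | hd'), h⟩)
      exacts [Or.inl (Or.inl h), Or.inl (Or.inr h), Or.inr ⟨d', hd', h⟩]

theorem nodup_pvCands (b : List (Int × Int × Int × List Int)) (p : Int × Int × Int × List Int) :
    (pvCands b p : List (Int × Int × Int)).Nodup := by
  suffices h : ∀ (ds : List Int) (s : PySem.Set (Int × Int × Int)), (s : List (Int × Int × Int)).Nodup →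
      (ds.foldl (fun s d => PySem.Set.union s ((pvIndex b).getD d PySem.Set.empty)) s : List (Int × Int × Int)).Nodup by
    exact h _ _ List.nodup_nil
  intro ds
  induction ds with
  | nil => intro s hs; exact hs
  | cons d t ih => intro s hs; exact ih _ (PySem.Set.nodup_union _ _ hs)

theorem pvShare_iff (p q : Int × Int × Int × List Int) :
    pvShare p q = true ↔ ∃ d ∈ p.2.2.2, d ∈ q.2.2.2 := by
  rw [pvShare, decide_eq_true_eq]
  constructor
  · intro h
    have hne : (PySem.Set.inter p.2.2.2 q.2.2.2 : List Int) ≠ [] := by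
      intro hc
      rw [PySem.Set.len, hc] at h
      simp at h
    obtain ⟨x, hx⟩ := List.exists_mem_of_ne_nil _ hne
    rw [PySem.Set.mem_inter] at hx
    exact ⟨x, hx.1, hx.2⟩
  · rintro ⟨d, h1, h2⟩
    have hx : d ∈ (PySem.Set.inter p.2.2.2 q.2.2.2 : List Int) :=
      (PySem.Set.mem_inter _ _ _).mpr ⟨h1, h2⟩
    have hpos : 0 < (PySem.Set.inter p.2.2.2 q.2.2.2 : List Int).length :=
      List.length_pos_iff.mpr (List.ne_nil_of_mem hx)
    rw [PySem.Set.len]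
    omega

theorem pvOff_injective (p : Int × Int × Int × List Int) : Function.Injective (pvOff p) := by
  intro c c' h
  obtain ⟨x, y, z⟩ := c; obtain ⟨x', y', z'⟩ := c'
  simp only [pvOff, Prod.ext_iff] at h ⊢
  omega

-- ---- per-point and total count equality ----

theorem count_point_eq (b : List (Int × Int × Int × List Int))
    (hb : (b.map pvKey).Nodup) (p : Int × Int × Int × List Int) (o : Int × Int × Int) :
    ((b.filter (fun q => pvShare p q)).map (fun q => pvOff p (pvKey q))).count o
    = ((pvCands b p).map (fun c => pvOff p c)).count o := by
  have hma : ((b.filter (fun q => pvShare p q)).map (fun q => pvOff p (pvKey q))).Nodup := by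
    have h1 : ((b.filter (fun q => pvShare p q)).map pvKey).Nodup :=
      (List.Sublist.map pvKey List.filter_sublist).nodup hb
    have h2 := h1.map (pvOff_injective p)
    rwa [List.map_map] at h2
  have hmb : ((pvCands b p).map (fun c => pvOff p c)).Nodup :=
    (nodup_pvCands b p).map (pvOff_injective p)
  have hmem : o ∈ (b.filter (fun q => pvShare p q)).map (fun q => pvOff p (pvKey q))
      ↔ o ∈ (pvCands b p).map (fun c => pvOff p c) := by
    simp only [List.mem_map, List.mem_filter, mem_pvCands]
    constructor
    · rintro ⟨q, ⟨hq, hs⟩, rfl⟩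
      exact ⟨pvKey q, ⟨q, hq, rfl, (pvShare_iff p q).mp hs⟩, rfl⟩
    · rintro ⟨c, ⟨q, hq, rfl, hd⟩, rfl⟩
      exact ⟨q, ⟨hq, (pvShare_iff p q).mpr hd⟩, rfl⟩
  by_cases h : o ∈ (b.filter (fun q => pvShare p q)).map (fun q => pvOff p (pvKey q))
  · rw [List.count_eq_one_of_mem hma h, List.count_eq_one_of_mem hmb (hmem.mp h)]
  · rw [List.count_eq_zero_of_not_mem h, List.count_eq_zero_of_not_mem (fun hc => h (hmem.mpr hc))]

theorem count_pvL_eq (a b : List (Int × Int × Int × List Int))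
    (hb : (b.map pvKey).Nodup) (o : Int × Int × Int) :
    (pvLA a b).count o = (pvLB a b).count o := by
  induction a with
  | nil => rfl
  | cons p t ih =>
    simp only [pvLA, pvLB, List.flatMap_cons, List.count_append] at *
    rw [count_point_eq b hb p o, ih]

theorem mem_pvL_iff (a b : List (Int × Int × Int × List Int))
    (hb : (b.map pvKey).Nodup) (o : Int × Int × Int) :
    o ∈ pvLA a b ↔ o ∈ pvLB a b := by
  rw [← List.count_pos_iff, ← List.count_pos_iff, count_pvL_eq a b hb o]

theorem items_perm (a b : List (Int × Int × Int × List Int)) (hb : (b.map pvKey).Nodup) :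
    (PySem.Dict.counter (pvLA a b)).items.Perm (PySem.Dict.counter (pvLB a b)).items := by
  rw [PySem.Dict.items_counter, PySem.Dict.items_counter]
  have hset : (PySem.Set.ofList (pvLA a b) : List (Int × Int × Int)).Perm (PySem.Set.ofList (pvLB a b)) := by
    rw [List.perm_ext_iff_of_nodup (PySem.Set.nodup_ofList _) (PySem.Set.nodup_ofList _)]
    intro o
    rw [PySem.Set.mem_ofList, PySem.Set.mem_ofList]
    exact mem_pvL_iff a b hb o
  have hfun : (fun k : Int × Int × Int => (k, ((pvLB a b).count k : Int)))
      = (fun k => (k, ((pvLA a b).count k : Int))) := by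
    funext k
    rw [count_pvL_eq a b hb k]
  rw [hfun]
  exact hset.map _

-- ---- Python max: a strict total order, invariant under permutation ----

theorem pvLt_asymm {x y : Int × (Int × Int × Int)} (h1 : pvLt x y = true) (h2 : pvLt y x = true) : False := by
  obtain ⟨a, b, c, d⟩ := x; obtain ⟨a', b', c', d'⟩ := y
  simp [pvLt] at h1 h2
  omega

theorem pvLt_total {x y : Int × (Int × Int × Int)} (h : x ≠ y) : pvLt x y = true ∨ pvLt y x = true := by
  obtain ⟨a, b, c, d⟩ := x; obtain ⟨a', b', c', d'⟩ := y
  simp only [ne_eq, Prod.ext_iff, not_and] at h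
  simp [pvLt]
  by_cases h1 : a = a' <;> by_cases h2 : b = b' <;> by_cases h3 : c = c' <;> omega

theorem pvLt_trans {x y z : Int × (Int × Int × Int)} (h1 : pvLt x y = true) (h2 : pvLt y z = true) :
    pvLt x z = true := by
  obtain ⟨a, b, c, d⟩ := x; obtain ⟨a', b', c', d'⟩ := y; obtain ⟨a'', b'', c'', d''⟩ := z
  simp [pvLt] at h1 h2 ⊢
  omega

theorem foldl_max_mem (t : List (Int × (Int × Int × Int))) (x : Int × (Int × Int × Int)) :
    t.foldl (fun m y => if pvLt m y then y else m) x ∈ x :: t := by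
  induction t generalizing x with
  | nil => simp
  | cons z t ih =>
    simp only [List.foldl_cons]
    by_cases h : pvLt x z = true
    · rw [if_pos h]
      exact List.mem_cons_of_mem x (ih z)
    · rw [if_neg h]
      rcases List.mem_cons.mp (ih x) with h' | h'
      · rw [h']
        exact List.mem_cons_self
      · exact List.mem_cons_of_mem x (List.mem_cons_of_mem z h')

theorem foldl_max_notlt (t : List (Int × (Int × Int × Int))) (x : Int × (Int × Int × Int)) :
    ∀ y ∈ x :: t, ¬ pvLt (t.foldl (fun m y => if pvLt m y then y else m) x) y = true := by
  induction t generalizing x with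
  | nil =>
    intro y hy
    simp only [List.mem_cons, List.not_mem_nil, or_false] at hy
    subst hy
    exact fun h => pvLt_asymm h h
  | cons z t ih =>
    intro y hy
    simp only [List.foldl_cons]
    by_cases hxz : pvLt x z = true
    · rw [if_pos hxz]
      rcases List.mem_cons.mp hy with rfl | hy'
      · intro hm
        exact ih z z List.mem_cons_self (pvLt_trans hm hxz)
      · rcases List.mem_cons.mp hy' with rfl | hy''
        · exact ih y y List.mem_cons_self
        · exact ih z y (List.mem_cons_of_mem z hy'')
    · rw [if_neg hxz]
      rcases List.mem_cons.mp hy with rfl | hy'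
      · exact ih y y List.mem_cons_self
      · rcases List.mem_cons.mp hy' with rfl | hy''
        · intro hm
          by_cases hxy : x = y
          · exact ih x x List.mem_cons_self (hxy ▸ hm)
          · rcases pvLt_total hxy with h | h
            · exact hxz h
            · exact ih x x List.mem_cons_self (pvLt_trans hm h)
        · exact ih x y (List.mem_cons_of_mem x hy'')

theorem pvMax?_perm {l l' : List (Int × (Int × Int × Int))} (h : l.Perm l') :
    pvMax? l = pvMax? l' := by
  rcases l with _ | ⟨x, t⟩
  · rw [h.nil_eq]
  · rcases l' with _ | ⟨x', t'⟩
    · exact absurd h.symm.nil_eq (by simp)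
    · simp only [pvMax?, Option.some.injEq]
      have hmem : t.foldl (fun m y => if pvLt m y then y else m) x ∈ x' :: t' :=
        h.mem_iff.mp (foldl_max_mem t x)
      have hmem' : t'.foldl (fun m y => if pvLt m y then y else m) x' ∈ x :: t :=
        h.mem_iff.mpr (foldl_max_mem t' x')
      by_contra hne
      rcases pvLt_total hne with hlt | hlt
      · exact foldl_max_notlt t x _ hmem' hlt
      · exact foldl_max_notlt t' x' _ hmem hlt

-- ===== VERDICT (by name: the statement is the Claim_ definition above) =====
theorem compare_dists_spec : Claim_equal_compare_dists := by
  intro a b _hdom hpre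
  unfold Spec_compare_dists
  have hb : (b.map pvKey).Nodup := hpre
  show compare_dists a b = compare_dists_alt a b
  have hA : compare_dists a b = pvTail (PySem.Dict.counter (pvLA a b)) := by
    rw [← offsetsA_eq]
    rfl
  have hB : compare_dists_alt a b = pvTail (PySem.Dict.counter (pvLB a b)) := by
    rw [← offsetsB_eq]
    rfl
  rw [hA, hB]
  have hperm := items_perm a b hb
  unfold pvTail
  by_cases hnil : (PySem.Dict.counter (pvLA a b)).items = []
  · have hnil' : (PySem.Dict.counter (pvLB a b)).items = [] :=
      ((hnil ▸ hperm : ([] : List ((Int × Int × Int) × Int)).Perm _).symm).eq_nil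
    rw [hnil, hnil']
  · have hnil' : (PySem.Dict.counter (pvLB a b)).items ≠ [] := fun hc =>
      hnil ((hc ▸ hperm : _ ).eq_nil)
    have e1 : (PySem.Dict.counter (pvLA a b)).items.isEmpty = false := by
      simp [hnil]
    have e2 : (PySem.Dict.counter (pvLB a b)).items.isEmpty = false := by
      simp [hnil']
    rw [e1, e2]
    simp only [Bool.false_eq_true, if_false]
    rw [pvMax?_perm (hperm.map _)]
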